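-- pv_equiv track=rewrite | github.com/OXERIS/web-sitedemo | score_calculator.py | calculate_education_language_skill_transferability_score
-- ===== SOURCE A (Python) =====
-- def calculate_education_language_skill_transferability_score(education_level, first_language_scores):
--     """
--     计算基于教育和官方语言能力结合的技能迁移因素得分。
--     :param education_level: str, 教育水平代码
--     :param first_language_scores: dict, 第一官方语言各项能力的等级，键为 'reading', 'writing', 'speaking', 'listening'
--     :return: int, 技能迁移因素得分
--     """
--     # 定义教育水平对应的分数
--     # 注意：根据您提供的评分标准，需要确保 education_level 的取值与评分标准匹配
--     score_table = {
--         "less_than_secondary": { "clb_7_or_more": 0, "clb_9_or_more": 0 },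
--         "secondary_diploma":    { "clb_7_or_more": 0, "clb_9_or_more": 0 },
--         "one_year_degree":      { "clb_7_or_more": 13, "clb_9_or_more": 25 },
--         "two_or_more_degrees":  { "clb_7_or_more": 25, "clb_9_or_more": 50 },
--         "bachelor_degree":      { "clb_7_or_more": 25, "clb_9_or_more": 50 },
--         "masters_or_professional": { "clb_7_or_more": 25, "clb_9_or_more": 50 },
--         "doctoral_degree":      { "clb_7_or_more": 25, "clb_9_or_more": 50 }
--     }
--
--     # 获取用户的教育水平得分配置
--     education_scores = score_table.get(education_level, {"clb_7_or_more": 0, "clb_9_or_more": 0})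
--
--     # 检查第一官方语言各项能力是否达到 CLB 7 及以上
--     all_clb7_or_higher = all(
--         score in ["clb_7", "clb_8", "clb_9", "clb_10_or_more"] for score in first_language_scores.values()
--     )
--
--     # 检查第一官方语言各项能力是否达到 CLB 9 及以上
--     all_clb9_or_higher = all(
--         score in ["clb_9", "clb_10_or_more"] for score in first_language_scores.values()
--     )
--
--     # 根据语言能力等级，选择对应的得分
--     if all_clb9_or_higher:
--         score = education_scores["clb_9_or_more"]
--     elif all_clb7_or_higher:
--         score = education_scores["clb_7_or_more"]
--     else:
--         score = 0
--
--     return score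
-- ===== SOURCE B (Python) =====
-- def calculate_education_language_skill_transferability_score(education_level, first_language_scores):
--     score_table = {
--         "less_than_secondary": { "clb_7_or_more": 0, "clb_9_or_more": 0 },
--         "secondary_diploma":    { "clb_7_or_more": 0, "clb_9_or_more": 0 },
--         "one_year_degree":      { "clb_7_or_more": 13, "clb_9_or_more": 25 },
--         "two_or_more_degrees":  { "clb_7_or_more": 25, "clb_9_or_more": 50 },
--         "bachelor_degree":      { "clb_7_or_more": 25, "clb_9_or_more": 50 },
--         "masters_or_professional": { "clb_7_or_more": 25, "clb_9_or_more": 50 },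
--         "doctoral_degree":      { "clb_7_or_more": 25, "clb_9_or_more": 50 }
--     }
--     education_scores = score_table.get(education_level, {"clb_7_or_more": 0, "clb_9_or_more": 0})
--
--     def rank(score):
--         if score in ("clb_9", "clb_10_or_more"):
--             return 2
--         if score in ("clb_7", "clb_8"):
--             return 1
--         return 0
--
--     worst = 2  # seed: an empty dict qualifies for the CLB-9 tier
--     for score in first_language_scores.values():
--         worst = min(worst, rank(score))
--
--     if worst >= 2:
--         return education_scores["clb_9_or_more"]
--     if worst >= 1:
--         return education_scores["clb_7_or_more"]
--     return 0
-- ===== Notes on version B (the rewrite author's own statement) =====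
-- stated objective: simpler
-- what changed: Replaces the two independent all() membership scans with one pass that keeps the minimum language rank (2 for clb_9/clb_10_or_more, 1 for clb_7/clb_8, 0 otherwise), then branches on that worst rank.
import Mathlib
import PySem

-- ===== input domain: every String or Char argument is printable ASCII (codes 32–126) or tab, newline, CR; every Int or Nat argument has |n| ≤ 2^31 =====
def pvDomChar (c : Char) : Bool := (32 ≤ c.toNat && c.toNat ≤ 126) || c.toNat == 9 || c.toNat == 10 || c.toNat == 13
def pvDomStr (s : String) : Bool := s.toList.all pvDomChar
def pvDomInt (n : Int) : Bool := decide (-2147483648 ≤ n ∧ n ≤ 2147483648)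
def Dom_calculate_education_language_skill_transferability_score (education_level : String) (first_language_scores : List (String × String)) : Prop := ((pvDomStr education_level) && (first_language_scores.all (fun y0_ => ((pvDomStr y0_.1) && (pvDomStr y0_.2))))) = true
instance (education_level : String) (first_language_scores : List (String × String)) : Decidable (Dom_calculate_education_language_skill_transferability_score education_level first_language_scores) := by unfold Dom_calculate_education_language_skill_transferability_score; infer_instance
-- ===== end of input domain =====

-- B replaces A's two independent all() scans with a single pass keeping the minimum language
-- rank, then branches on that worst rank (objective: simpler).


-- ===== PORT A =====
-- score_table.get(education_level, {..0,0..}) : the inner dict is represented as the pair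
-- (clb_7_or_more value, clb_9_or_more value); the lookup is exact on all strings.
def pvScoreTableGet (education_level : String) : Int × Int :=
  if education_level = "less_than_secondary" then (0, 0)
  else if education_level = "secondary_diploma" then (0, 0)
  else if education_level = "one_year_degree" then (13, 25)
  else if education_level = "two_or_more_degrees" then (25, 50)
  else if education_level = "bachelor_degree" then (25, 50)
  else if education_level = "masters_or_professional" then (25, 50)
  else if education_level = "doctoral_degree" then (25, 50)
  else (0, 0)

def calculate_education_language_skill_transferability_score (education_level : String) (first_language_scores : List (String × String)) : Int :=
  let education_scores := pvScoreTableGet education_level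
  let all_clb7_or_higher :=
    first_language_scores.all (fun kv => (["clb_7", "clb_8", "clb_9", "clb_10_or_more"] : List String).contains kv.2)
  let all_clb9_or_higher :=
    first_language_scores.all (fun kv => (["clb_9", "clb_10_or_more"] : List String).contains kv.2)
  if all_clb9_or_higher then education_scores.2
  else if all_clb7_or_higher then education_scores.1
  else 0

-- ===== PORT B =====
def pvRank (score : String) : Int :=
  if (["clb_9", "clb_10_or_more"] : List String).contains score then 2
  else if (["clb_7", "clb_8"] : List String).contains score then 1
  else 0

def calculate_education_language_skill_transferability_score_alt (education_level : String) (first_language_scores : List (String × String)) : Int :=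
  let education_scores := pvScoreTableGet education_level
  let worst := first_language_scores.foldl (fun w kv => min w (pvRank kv.2)) 2
  if worst ≥ 2 then education_scores.2
  else if worst ≥ 1 then education_scores.1
  else 0

-- ===== PRECONDITION & SPEC =====
def Spec_calculate_education_language_skill_transferability_score (education_level : String) (first_language_scores : List (String × String)) (out : Int) : Prop := out = calculate_education_language_skill_transferability_score_alt education_level first_language_scores
instance (education_level : String) (first_language_scores : List (String × String)) (out : Int) : Decidable (Spec_calculate_education_language_skill_transferability_score education_level first_language_scores out) := by unfold Spec_calculate_education_language_skill_transferability_score; infer_instance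

-- ===== CLAIM (what is proved, stated in full; the proofs are below) =====
def Claim_equal_calculate_education_language_skill_transferability_score : Prop := ∀ (education_level : String) (first_language_scores : List (String × String)), Dom_calculate_education_language_skill_transferability_score education_level first_language_scores → Spec_calculate_education_language_skill_transferability_score education_level first_language_scores (calculate_education_language_skill_transferability_score education_level first_language_scores)

-- ===== LEMMAS AND PROOFS =====

-- The fold of `min` is ≥ c iff the seed and every rank are ≥ c.
theorem pv_fold_ge (c : Int) (xs : List (String × String)) (w : Int) :
    (c ≤ xs.foldl (fun w kv => min w (pvRank kv.2)) w) ↔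
      (c ≤ w ∧ xs.all (fun kv => decide (c ≤ pvRank kv.2)) = true) := by
  induction xs generalizing w with
  | nil => simp
  | cons h t ih =>
    simp only [List.foldl_cons, List.all_cons, ih, le_min_iff, Bool.and_eq_true,
      decide_eq_true_eq]
    tauto

theorem pv_rank_ge_two (s : String) :
    decide ((2 : Int) ≤ pvRank s) = (["clb_9", "clb_10_or_more"] : List String).contains s := by
  by_cases h1 : s = "clb_9" <;> by_cases h2 : s = "clb_10_or_more" <;>
    by_cases h3 : s = "clb_7" <;> by_cases h4 : s = "clb_8" <;>
      simp_all [pvRank]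

theorem pv_rank_ge_one (s : String) :
    decide ((1 : Int) ≤ pvRank s) = (["clb_7", "clb_8", "clb_9", "clb_10_or_more"] : List String).contains s := by
  by_cases h1 : s = "clb_9" <;> by_cases h2 : s = "clb_10_or_more" <;>
    by_cases h3 : s = "clb_7" <;> by_cases h4 : s = "clb_8" <;>
      simp_all [pvRank]

-- ===== VERDICT (by name: the statement is the Claim_ definition above) =====
theorem calculate_education_language_skill_transferability_score_spec : Claim_equal_calculate_education_language_skill_transferability_score := by
  intro el fls _
  unfold Spec_calculate_education_language_skill_transferability_score
  unfold calculate_education_language_skill_transferability_score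
  unfold calculate_education_language_skill_transferability_score_alt
  have h2 := pv_fold_ge 2 fls 2
  have h1 := pv_fold_ge 1 fls 2
  simp only [pv_rank_ge_two, pv_rank_ge_one] at h2 h1
  have h2' : ((2 : Int) ≤ fls.foldl (fun w kv => min w (pvRank kv.2)) 2) ↔
      (fls.all fun kv => (["clb_9", "clb_10_or_more"] : List String).contains kv.2) = true :=
    ⟨fun h => (h2.mp h).2, fun h => h2.mpr ⟨by norm_num, h⟩⟩
  have h1' : ((1 : Int) ≤ fls.foldl (fun w kv => min w (pvRank kv.2)) 2) ↔
      (fls.all fun kv => (["clb_7", "clb_8", "clb_9", "clb_10_or_more"] : List String).contains kv.2) = true :=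
    ⟨fun h => (h1.mp h).2, fun h => h1.mpr ⟨by norm_num, h⟩⟩
  simp only [ge_iff_le]
  split_ifs <;> tauto
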